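-- pv_equiv track=rewrite | github.com/TiagoAnastacio/machine_learning_project | Programming for Data Science/Assignments/Assignment 1/package/zTESTES/yahtzee1.py | evaluate
-- ===== SOURCE A (Python) =====
-- def create_empty_scorecard():
--     scores = {
--         '1' : None,
--         '2' : None,
--         '3' : None,
--         '4' : None,
--         '5' : None,
--         '6' : None,
--         'three_of_a_kind' : None,
--         'four_of_a_kind': None,
--         'full_house': None,
--         'four_straight' : None,
--         'five_straight' : None,
--         'yahtzee' : None,
--         'chance' : None
--     }
--     return scores
--
-- def has_straight(dice, length):
--     dummy_dice = dice.copy()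
--     dummy_dice = set(dummy_dice)
--     dummy_dice = list(dummy_dice)
--     dummy_dice.sort()
--     is_there_sequence = 0
--     for idx, i in enumerate(dummy_dice):
--         check_length = list(range(i, i + length, 1))
--         if check_length == dummy_dice[idx: idx + length]:
--             is_there_sequence += 1
--     if is_there_sequence > 0:
--         return True
--     else:
--         return False
--
-- def evaluate(dice):
--     '''
--     This function returns the score for each category based on the current dice roll.
--     It evaluates number categories (1-6), three/four of a kind, full house, straights, yahtzee and chance.
--     '''
--     scores = create_empty_scorecard()
--
--     total = sum(dice) #sum of all dice (to be used in several categories below)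
--
--     counts = {} #dictionary to count the occurrences of each value
--     for i in dice:
--         if i in counts:
--             counts[i] += 1 #if already appears we increase the count by 1
--         else:
--             counts[i] = 1 #if its the first occurrence (start at 1)
--
--     for i in range(1, 7):
--         scores[str(i)] = dice.count(i) * i #multiplies each value (i) by its occurrences (dice.count(i))
--
--     for value in counts.values():
--         if value >= 5: #if a given number appears 5 times in the dice roll
--             scores["yahtzee"] = 50 #Yahtzee: 5 of the same number DÁ PRA TIRAR
--             scores["four_of_a_kind"] = total #a given number appearing 5 times implies appearing 4 times
--             scores["three_of_a_kind"] = total #a given number appearing 5 times implies appearing 3 times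
--         if value >= 4: #if a given number appears 4 times in the dice roll
--             scores["four_of_a_kind"] = total #four_of_a_kind: 4 of the same number DÁ PRA TIRAR
--             scores["three_of_a_kind"] = total #a given number appearing 4 times implies appearing 3 times
--         elif value >= 3: #if a given number appears 3 times in the dice roll
--             scores["three_of_a_kind"] = total #three_of_a_kind: 3 of the same number DÁ PRA TIRAR
--
--     if 2 in counts.values() and 3 in counts.values(): #having exactly 2 times of one number and 3 times of another
--         scores["full_house"] = 25
--
--     if has_straight(dice,5): #checking for a sequence of 5 using has_straight function above
--             scores["four_straight"] = 30
--             scores["five_straight"] = 40 #if there is a sequence of 5, there is also a sequence of 4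
--     elif has_straight(dice,4): #checking for a sequence of 4 using has_straight function above
--         scores["four_straight"] = 30
--
--     scores["chance"] = total #total of all dice (no restrictions)
--
--     return scores
-- ===== SOURCE B (Python) =====
-- def evaluate(dice):
--     '''
--     This function returns the score for each category based on the current dice roll.
--     It evaluates number categories (1-6), three/four of a kind, full house, straights, yahtzee and chance.
--     '''
--     total = sum(dice)
--
--     counts = {}
--     for d in dice:
--         counts[d] = counts.get(d, 0) + 1
--
--     max_count = 0
--     for v in counts.values():
--         max_count = max(max_count, v)
--
--     three = four = yahtzee = None
--     if max_count >= 5: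
--         three, four, yahtzee = total, total, 50
--     elif max_count == 4:
--         three, four = total, total
--     elif max_count == 3:
--         three = total
--
--     full_house = 25 if 2 in counts.values() and 3 in counts.values() else None
--
--     def run(length):
--         # is there a window of `length` consecutive values among the rolled faces?
--         return any(all(f + k in counts for k in range(length)) for f in counts)
--
--     if run(5):
--         four_straight, five_straight = 30, 40
--     elif run(4):
--         four_straight, five_straight = 30, None
--     else:
--         four_straight, five_straight = None, None
--
--     scores = {str(i): counts.get(i, 0) * i for i in range(1, 7)}
--     scores.update({
--         'three_of_a_kind': three,
--         'four_of_a_kind': four,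
--         'full_house': full_house,
--         'four_straight': four_straight,
--         'five_straight': five_straight,
--         'yahtzee': yahtzee,
--         'chance': total,
--     })
--     return scores
-- ===== Notes on version B (the rewrite author's own statement) =====
-- stated objective: simpler
-- what changed: B replaces A's cascading >=5 / >=4 / elif >=3 loop over the count dict by a single running maximum of the counts with one branch on it, replaces A's sort-then-enumerate-and-compare-slices straight detection by a direct 'length consecutive values all among the rolled faces' window test, reads the number scores from the frequency dict instead of six dice.count passes, and assembles the scorecard once at the end.
import Mathlib
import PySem

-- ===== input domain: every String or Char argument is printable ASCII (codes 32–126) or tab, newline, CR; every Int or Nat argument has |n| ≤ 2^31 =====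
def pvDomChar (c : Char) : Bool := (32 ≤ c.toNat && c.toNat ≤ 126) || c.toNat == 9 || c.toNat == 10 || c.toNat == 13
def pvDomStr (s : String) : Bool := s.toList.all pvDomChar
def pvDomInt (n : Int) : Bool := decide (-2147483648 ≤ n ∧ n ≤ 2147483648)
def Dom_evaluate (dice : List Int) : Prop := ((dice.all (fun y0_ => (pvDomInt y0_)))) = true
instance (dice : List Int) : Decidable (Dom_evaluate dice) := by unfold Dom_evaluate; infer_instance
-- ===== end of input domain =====

-- B replaces A's cascading of-a-kind loop by a single branch on the maximal face count, A's
-- sort-and-slice straight scan by a direct consecutive-window membership test over the rolled faces,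
-- and A's six dice.count passes by lookups in the frequency dict (objective: simpler; measured faster).

-- ===== PORT A =====
def create_empty_scorecard : PySem.Dict String (Option Int) :=
  PySem.Dict.ofList [("1", none), ("2", none), ("3", none), ("4", none), ("5", none), ("6", none),
    ("three_of_a_kind", none), ("four_of_a_kind", none), ("full_house", none),
    ("four_straight", none), ("five_straight", none), ("yahtzee", none), ("chance", none)]

def has_straight (dice : List Int) (length : Int) : Bool :=
  let dummy := PySem.List.sorted (PySem.Set.ofList dice) (fun x => x) false
  let cnt : Int := (PySem.List.enumerate dummy 0).foldl (fun acc p =>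
      if PySem.List.pyRange p.2 (p.2 + length) 1 =
         PySem.List.slice dummy (some p.1) (some (p.1 + length)) then acc + 1 else acc) 0
  if cnt > 0 then true else false

def evaluate (dice : List Int) : List (String × Option Int) :=
  let scores := create_empty_scorecard
  let total : Int := dice.sum
  let counts : PySem.Dict Int Int :=
    dice.foldl (fun d i => if d.contains i then d.modify i 0 (· + 1) else d.insert i 1) PySem.Dict.empty
  let scores := (PySem.List.pyRange 1 7 1).foldl
    (fun s i => s.insert (PySem.Int.toStr i) (some ((PySem.List.count dice i : Int) * i))) scores
  let scores := counts.values.foldl (fun s v =>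
    let s := if 5 ≤ v then
        ((s.insert "yahtzee" (some 50)).insert "four_of_a_kind" (some total)).insert "three_of_a_kind" (some total)
      else s
    if 4 ≤ v then (s.insert "four_of_a_kind" (some total)).insert "three_of_a_kind" (some total)
    else if 3 ≤ v then s.insert "three_of_a_kind" (some total)
    else s) scores
  let scores := if counts.values.contains 2 && counts.values.contains 3
    then scores.insert "full_house" (some 25) else scores
  let scores := if has_straight dice 5 then
      (scores.insert "four_straight" (some 30)).insert "five_straight" (some 40)
    else if has_straight dice 4 then scores.insert "four_straight" (some 30)
    else scores
  let scores := scores.insert "chance" (some total)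
  scores.items

-- ===== PORT B =====
def evaluate_alt (dice : List Int) : List (String × Option Int) :=
  let total : Int := dice.sum
  let counts : PySem.Dict Int Int :=
    dice.foldl (fun d x => d.insert x (d.getD x 0 + 1)) PySem.Dict.empty
  let maxCount : Int := counts.values.foldl (fun m v => max m v) 0
  let tfy : Option Int × Option Int × Option Int :=
    if 5 ≤ maxCount then (some total, some total, some 50)
    else if maxCount = 4 then (some total, some total, none)
    else if maxCount = 3 then (some total, none, none)
    else (none, none, none)
  let fullHouse : Option Int :=
    if counts.values.contains 2 && counts.values.contains 3 then some 25 else none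
  let run : Int → Bool := fun length =>
    counts.keys.any (fun f => (PySem.List.pyRange 0 length 1).all (fun k => counts.contains (f + k)))
  let straights : Option Int × Option Int :=
    if run 5 then (some 30, some 40)
    else if run 4 then (some 30, none)
    else (none, none)
  (PySem.List.pyRange 1 7 1).map (fun i => (PySem.Int.toStr i, some (counts.getD i 0 * i)))
    ++ [("three_of_a_kind", tfy.1), ("four_of_a_kind", tfy.2.1), ("full_house", fullHouse),
        ("four_straight", straights.1), ("five_straight", straights.2), ("yahtzee", tfy.2.2), ("chance", some total)]

-- ===== PRECONDITION & SPEC =====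
def Spec_evaluate (dice : List Int) (out : List (String × Option Int)) : Prop := out = evaluate_alt dice
instance (dice : List Int) (out : List (String × Option Int)) : Decidable (Spec_evaluate dice out) := by unfold Spec_evaluate; infer_instance

-- ===== CLAIM (what is proved, stated in full; the proofs are below) =====
def Claim_equal_evaluate : Prop := ∀ (dice : List Int), Dom_evaluate dice → Spec_evaluate dice (evaluate dice)

-- ===== LEMMAS AND PROOFS =====

theorem pv_counter_eq (dice : List Int) :
    dice.foldl (fun d i => if d.contains i then d.modify i 0 (· + 1) else d.insert i 1) PySem.Dict.empty
      = PySem.Dict.counter dice := by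
  rw [PySem.Dict.counter_eq_foldl]
  apply PySem.List.foldl_congr_mem
  intro acc x _
  by_cases h : acc.contains x = true
  · simp [h]
  · simp only [Bool.not_eq_true] at h
    simp [h, PySem.Dict.modify, PySem.Dict.insert, PySem.Dict.getD_of_not_contains]
theorem pv_max_iff (cs : List Int) (k : Int) (hk : 0 < k) :
    (k ≤ cs.foldl max 0) ↔ ∃ v ∈ cs, k ≤ v := by
  constructor
  · intro h
    rcases PySem.List.foldl_max_mem cs 0 with h0 | hm
    · omega
    · exact ⟨_, hm, h⟩
  · rintro ⟨v, hv, hkv⟩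
    exact le_trans hkv ((PySem.List.le_foldl_max cs 0).2 v hv)

theorem pv_straight_core (sd : List Int) (hs : sd.Pairwise (· < ·)) (L : Int) (hL : 1 ≤ L) :
    (∃ (k : Nat) (hk : k < sd.length),
        PySem.List.pyRange sd[k] (sd[k] + L) 1 = PySem.List.slice sd (some (k : Int)) (some ((k : Int) + L)))
    ↔ ∃ f ∈ sd, ∀ j : Int, 0 ≤ j → j < L → f + j ∈ sd := by
  have hmono := List.pairwise_iff_getElem.mp hs
  constructor
  · rintro ⟨k, hk, heq⟩
    refine ⟨sd[k], List.getElem_mem hk, fun j hj0 hjL => ?_⟩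
    have hmem : sd[k] + j ∈ PySem.List.pyRange sd[k] (sd[k] + L) 1 := by
      rw [PySem.List.mem_pyRange_one]; omega
    rw [heq] at hmem
    apply PySem.List.mem_of_mem_slice
    exact hmem
  · rintro ⟨f, hf, hall⟩
    obtain ⟨k, hk, hkf⟩ := List.mem_iff_getElem.mp hf
    set N := L.toNat with hNdef
    have hN : (N : Int) = L := by omega
    have main : ∀ j : Nat, j < N → ∃ h : k + j < sd.length, sd[k + j] = f + j := by
      intro j hj
      induction j with
      | zero => exact ⟨by omega, by simpa using hkf⟩
      | succ j ih =>
        obtain ⟨hlt, hval⟩ := ih (by omega)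
        have hmem : f + (j + 1 : Int) ∈ sd := hall (j + 1) (by omega) (by omega)
        obtain ⟨p, hp, hpval⟩ := List.mem_iff_getElem.mp hmem
        have hkp : k + j < p := by
          by_contra hle
          rcases Nat.lt_or_ge p (k + j) with h1 | h2
          · have := hmono p (k + j) hp hlt h1; omega
          · have hpe : p = k + j := by omega
            subst hpe; omega
        have hlt' : k + j + 1 < sd.length := by omega
        refine ⟨hlt', ?_⟩
        have h1 : sd[k + j] < sd[k + j + 1] := hmono _ _ hlt hlt' (by omega)
        have h2 : sd[k + j + 1] ≤ sd[p] := by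
          rcases Nat.lt_or_ge (k + j + 1) p with h | h
          · exact le_of_lt (hmono _ _ hlt' hp h)
          · have : k + j + 1 = p := by omega
            subst this; exact le_refl _
        show sd[k + j + 1] = f + ((j : Int) + 1)
        omega
    have hlen : k + N ≤ sd.length := by
      obtain ⟨h, _⟩ := main (N - 1) (by omega)
      omega
    refine ⟨k, by omega, ?_⟩
    have hcast : (k : Int) + L = ((k + N : Nat) : Int) := by push_cast; omega
    rw [hkf, hcast, PySem.List.slice_natCast, PySem.List.pyRange_one]
    have harg : (f + L - f).toNat = N := by omega
    rw [harg]
    have hsub : k + N - k = N := by omega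
    rw [hsub]
    apply List.ext_getElem
    · simp
      omega
    · intro i h1 h2
      have hiN : i < N := by simpa using h1
      obtain ⟨hi, hival⟩ := main i hiN
      simp [List.getElem_take, List.getElem_drop, hival]

theorem pv_straight_iff (dice : List Int) (L : Int) (hL : 1 ≤ L) :
    has_straight dice L =
      (PySem.Dict.counter dice).keys.any (fun f =>
        (PySem.List.pyRange 0 L 1).all (fun k => (PySem.Dict.counter dice).contains (f + k))) := by
  have hpair : (PySem.List.sorted (PySem.Set.ofList dice) (fun x => x) false).Pairwise (· < ·) :=
    PySem.List.sorted_ofList_pairwise_lt (xs := dice)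
  have hcore := pv_straight_core _ hpair L hL
  unfold has_straight
  rw [Bool.eq_iff_iff]
  dsimp only
  rw [PySem.List.foldl_ite_add_one]
  simp only [zero_add, gt_iff_lt, Int.natCast_pos, List.countP_pos_iff, List.any_eq_true,
    List.all_eq_true, PySem.List.mem_pyRange_one, PySem.Dict.keys_counter, PySem.Dict.contains_counter,
    PySem.List.mem_enumerate_iff, decide_eq_true_eq,
    Bool.if_false_right, Bool.and_true, PySem.Set.mem_ofList]
  simp only [PySem.List.mem_sorted, PySem.Set.mem_ofList] at hcore
  constructor
  · rintro ⟨a, ⟨k, hk, rfl⟩, heq⟩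
    obtain ⟨f, hf, hall⟩ := hcore.mp ⟨k, hk, heq⟩
    exact ⟨f, hf, fun j hj => by simpa [List.contains_iff_mem] using hall j hj.1 hj.2⟩
  · rintro ⟨f, hf, hall⟩
    have hall' : ∀ j : ℤ, 0 ≤ j → j < L → f + j ∈ dice := fun j h1 h2 => by
      simpa [List.contains_iff_mem] using hall j ⟨h1, h2⟩
    obtain ⟨k, hk, heq⟩ := hcore.mpr ⟨f, hf, hall'⟩
    exact ⟨((k : Int), (PySem.List.sorted (PySem.Set.ofList dice) (fun x => x) false)[k]),
      ⟨k, hk, rfl⟩, by simpa using heq⟩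

theorem pv_ak_get (T : Int) (vals : List Int) (d : PySem.Dict String (Option Int)) (x : String) :
    (vals.foldl (fun s v =>
      if 4 ≤ v then
        (((if 5 ≤ v then
            ((s.insert "yahtzee" (some 50)).insert "four_of_a_kind" (some T)).insert "three_of_a_kind" (some T)
          else s).insert "four_of_a_kind" (some T)).insert "three_of_a_kind" (some T))
      else if 3 ≤ v then
        (if 5 ≤ v then
            ((s.insert "yahtzee" (some 50)).insert "four_of_a_kind" (some T)).insert "three_of_a_kind" (some T)
          else s).insert "three_of_a_kind" (some T)
      else (if 5 ≤ v then
            ((s.insert "yahtzee" (some 50)).insert "four_of_a_kind" (some T)).insert "three_of_a_kind" (some T)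
          else s)) d).get? x =
    if x = "yahtzee" then (if vals.any (fun v => decide (5 ≤ v)) then some (some 50) else d.get? x)
    else if x = "four_of_a_kind" then (if vals.any (fun v => decide (4 ≤ v)) then some (some T) else d.get? x)
    else if x = "three_of_a_kind" then (if vals.any (fun v => decide (3 ≤ v)) then some (some T) else d.get? x)
    else d.get? x := by
  induction vals generalizing d with
  | nil => simp
  | cons v vs ih =>
    simp only [List.foldl_cons, List.any_cons]
    rw [ih]
    by_cases h5 : (5:Int) ≤ v <;> by_cases h4 : (4:Int) ≤ v <;> by_cases h3 : (3:Int) ≤ v <;>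
      simp only [h5, h4, h3, if_true, if_false, decide_true, decide_false, Bool.true_or,
        Bool.false_or] <;>
      first
      | omega
      | (split_ifs with hA hB hC <;> simp_all [PySem.Dict.get?_insert])

theorem pv_ak_keys (T : Int) (vals : List Int) (d : PySem.Dict String (Option Int))
    (h3 : d.contains "three_of_a_kind" = true) (h4 : d.contains "four_of_a_kind" = true)
    (h5 : d.contains "yahtzee" = true) :
    (vals.foldl (fun s v =>
      if 4 ≤ v then
        (((if 5 ≤ v then
            ((s.insert "yahtzee" (some 50)).insert "four_of_a_kind" (some T)).insert "three_of_a_kind" (some T)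
          else s).insert "four_of_a_kind" (some T)).insert "three_of_a_kind" (some T))
      else if 3 ≤ v then
        (if 5 ≤ v then
            ((s.insert "yahtzee" (some 50)).insert "four_of_a_kind" (some T)).insert "three_of_a_kind" (some T)
          else s).insert "three_of_a_kind" (some T)
      else (if 5 ≤ v then
            ((s.insert "yahtzee" (some 50)).insert "four_of_a_kind" (some T)).insert "three_of_a_kind" (some T)
          else s)) d).keys = d.keys := by
  induction vals generalizing d with
  | nil => rfl
  | cons v vs ih =>
    simp only [List.foldl_cons]
    split_ifs with hA hB hC <;>
      rw [ih] <;>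
      simp [PySem.Dict.keys_insert_of_contains, PySem.Dict.contains_insert, h3, h4, h5]

-- ===== VERDICT (by name: the statement is the Claim_ definition above) =====
set_option maxHeartbeats 1000000 in
theorem evaluate_spec : Claim_equal_evaluate := by
  intro dice _
  show evaluate dice = evaluate_alt dice
  unfold evaluate evaluate_alt
  dsimp only
  rw [pv_counter_eq, PySem.Dict.foldl_insert_getD_add_one_eq_counter]
  rw [show PySem.List.pyRange 1 7 1 = [1,2,3,4,5,6] from by decide]
  simp only [List.foldl_cons, List.foldl_nil]
  rw [show PySem.Int.toStr 1 = "1" from by decide, show PySem.Int.toStr 2 = "2" from by decide,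
      show PySem.Int.toStr 3 = "3" from by decide, show PySem.Int.toStr 4 = "4" from by decide,
      show PySem.Int.toStr 5 = "5" from by decide, show PySem.Int.toStr 6 = "6" from by decide]
  rw [show create_empty_scorecard = PySem.Dict.mk [("1", none), ("2", none), ("3", none), ("4", none), ("5", none), ("6", none), ("three_of_a_kind", none), ("four_of_a_kind", none), ("full_house", none), ("four_straight", none), ("five_straight", none), ("yahtzee", none), ("chance", none)] from by decide]
  rw [show ((((((PySem.Dict.mk [("1", none), ("2", none), ("3", none), ("4", none), ("5", none), ("6", none), ("three_of_a_kind", none), ("four_of_a_kind", none), ("full_house", none), ("four_straight", none), ("five_straight", none), ("yahtzee", none), ("chance", none)]).insert "1" (some ((PySem.List.count dice 1 : Int) * 1))).insert "2" (some ((PySem.List.count dice 2 : Int) * 2))).insert "3" (some ((PySem.List.count dice 3 : Int) * 3))).insert "4" (some ((PySem.List.count dice 4 : Int) * 4))).insert "5" (some ((PySem.List.count dice 5 : Int) * 5))).insert "6" (some ((PySem.List.count dice 6 : Int) * 6)) = PySem.Dict.mk [("1", some ((PySem.List.count dice 1 : Int) * 1)), ("2", some ((PySem.List.count dice 2 : Int)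 * 2)), ("3", some ((PySem.List.count dice 3 : Int) * 3)), ("4", some ((PySem.List.count dice 4 : Int) * 4)), ("5", some ((PySem.List.count dice 5 : Int) * 5)), ("6", some ((PySem.List.count dice 6 : Int) * 6)), ("three_of_a_kind", none), ("four_of_a_kind", none), ("full_house", none), ("four_straight", none), ("five_straight", none), ("yahtzee", none), ("chance", none)] from by simp [PySem.Dict.insert]]
  have hakd : List.foldl (fun s v =>
      if 4 ≤ v then
        (((if 5 ≤ v then
            ((s.insert "yahtzee" (some 50)).insert "four_of_a_kind" (some dice.sum)).insert "three_of_a_kind" (some dice.sum)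
          else s).insert "four_of_a_kind" (some dice.sum)).insert "three_of_a_kind" (some dice.sum))
      else if 3 ≤ v then
        (if 5 ≤ v then
            ((s.insert "yahtzee" (some 50)).insert "four_of_a_kind" (some dice.sum)).insert "three_of_a_kind" (some dice.sum)
          else s).insert "three_of_a_kind" (some dice.sum)
      else (if 5 ≤ v then
            ((s.insert "yahtzee" (some 50)).insert "four_of_a_kind" (some dice.sum)).insert "three_of_a_kind" (some dice.sum)
          else s))
      (PySem.Dict.mk [("1", some ((PySem.List.count dice 1 : Int) * 1)), ("2", some ((PySem.List.count dice 2 : Int) * 2)), ("3", some ((PySem.List.count dice 3 : Int) * 3)), ("4", some ((PySem.List.count dice 4 : Int) * 4)), ("5", some ((PySem.List.count dice 5 : Int) * 5)), ("6", some ((PySem.List.count dice 6 : Int) * 6)), ("three_of_a_kind", none), ("four_of_a_kind", none), ("full_house", none), ("four_straight", none), ("five_straight", none), ("yahtzee", none), ("chance", none)]) (PySem.Dict.counter dice).values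
    = PySem.Dict.mk [("1", some ((PySem.List.count dice 1 : Int) * 1)), ("2", some ((PySem.List.count dice 2 : Int) * 2)), ("3", some ((PySem.List.count dice 3 : Int) * 3)), ("4", some ((PySem.List.count dice 4 : Int) * 4)), ("5", some ((PySem.List.count dice 5 : Int) * 5)), ("6", some ((PySem.List.count dice 6 : Int) * 6)), ("three_of_a_kind", if (PySem.Dict.counter dice).values.any (fun v => decide (3 ≤ v)) then some dice.sum else none), ("four_of_a_kind", if (PySem.Dict.counter dice).values.any (fun v => decide (4 ≤ v)) then some dice.sum else none), ("full_house", none), ("four_straight", none), ("five_straight", none), ("yahtzee", if (PySem.Dict.counter dice).values.any (fun v => decide (5 ≤ v)) then some (50:Int) else none), ("chance", none)] := by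
    have hkeys := pv_ak_keys dice.sum (PySem.Dict.counter dice).values (PySem.Dict.mk [("1", some ((PySem.List.count dice 1 : Int) * 1)), ("2", some ((PySem.List.count dice 2 : Int) * 2)), ("3", some ((PySem.List.count dice 3 : Int) * 3)), ("4", some ((PySem.List.count dice 4 : Int) * 4)), ("5", some ((PySem.List.count dice 5 : Int) * 5)), ("6", some ((PySem.List.count dice 6 : Int) * 6)), ("three_of_a_kind", none), ("four_of_a_kind", none), ("full_house", none), ("four_straight", none), ("five_straight", none), ("yahtzee", none), ("chance", none)])
      (by simp) (by simp) (by simp)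
    apply PySem.Dict.ext
    rw [PySem.Dict.items_eq_map_keys _ (by rw [hkeys]; simp [PySem.Dict.keys_mk]) none, hkeys]
    simp only [PySem.Dict.keys_mk, List.map_cons, List.map_nil]
    simp only [PySem.Dict.getD_eq_get?_getD, pv_ak_get]
    simp [PySem.Dict.get?_mk_cons]
    refine ⟨by split_ifs <;> rfl, by split_ifs <;> rfl, by split_ifs <;> rfl⟩
  rw [hakd]
  rw [pv_straight_iff dice 5 (by norm_num), pv_straight_iff dice 4 (by norm_num)]
  rw [show (fun (m v : Int) => max m v) = (max : Int → Int → Int) from rfl]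
  have e5 : ((((PySem.Dict.counter dice).values).any (fun v => decide (5 ≤ v))) = true)
      = (5 ≤ ((PySem.Dict.counter dice).values).foldl max 0) := by
    rw [eq_iff_iff, pv_max_iff _ 5 (by norm_num)]
    simp
  have e4 : ((((PySem.Dict.counter dice).values).any (fun v => decide (4 ≤ v))) = true)
      = (4 ≤ ((PySem.Dict.counter dice).values).foldl max 0) := by
    rw [eq_iff_iff, pv_max_iff _ 4 (by norm_num)]
    simp
  have e3 : ((((PySem.Dict.counter dice).values).any (fun v => decide (3 ≤ v))) = true)
      = (3 ≤ ((PySem.Dict.counter dice).values).foldl max 0) := by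
    rw [eq_iff_iff, pv_max_iff _ 3 (by norm_num)]
    simp
  simp only [e5, e4, e3]
  simp only [List.map_cons, List.map_nil]
  rw [show PySem.Int.toStr 1 = "1" from by decide, show PySem.Int.toStr 2 = "2" from by decide,
      show PySem.Int.toStr 3 = "3" from by decide, show PySem.Int.toStr 4 = "4" from by decide,
      show PySem.Int.toStr 5 = "5" from by decide, show PySem.Int.toStr 6 = "6" from by decide]
  clear hakd e5 e4 e3
  split_ifs <;> simp [PySem.Dict.insert, PySem.Dict.getD_counter, PySem.List.count_eq] <;> omega
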